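-- pv_equiv track=rewrite | github.com/google/perfetto | python/tools/format_sql.py | extract_comment_blocks
-- ===== SOURCE A (Python) =====
-- from typing import Dict, List, Tuple, Union
--
-- def extract_comment_blocks(sql: str) -> Tuple[str, Dict[str, str]]:
--   """Extract comment blocks from SQL and replace with placeholders.
--
--   A comment block is defined as one or more comment lines (starting with --)
--   that are surrounded by empty lines or start/end of file.
--
--   Args:
--     sql: Input SQL string
--
--   Returns:
--     A tuple containing:
--       - Processed SQL with comment blocks replaced by placeholders
--       - Dict mapping placeholders to their original comment blocks
--   """
--   # Split into chunks separated by empty lines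
--   chunks = []
--   current = []
--   for line in sql.splitlines():
--     if line.strip():
--       current.append(line)
--     elif current:
--       chunks.append(current)
--       current = []
--   if current:
--     chunks.append(current)
--
--   # Process each chunk
--   blocks = {}
--   result = []
--   for i, chunk in enumerate(chunks):
--     # A chunk is a comment block if all lines start with --
--     if all(line.strip().startswith('--') for line in chunk):
--       placeholder = f'-- __COMMENT_BLOCK_{i}__'
--       blocks[placeholder] = '\n'.join(chunk) + '\n'
--       result.append('')
--       result.append(placeholder)
--       result.append('')
--     else:
--       result.append('')
--       result.extend(chunk)
--       result.append('')
--
--   return '\n'.join(result).strip(), blocks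
-- ===== SOURCE B (Python) =====
-- from typing import Dict, Tuple
--
--
-- def extract_comment_blocks(sql: str) -> Tuple[str, Dict[str, str]]:
--   """Single streaming pass: gather lines into the pending chunk and flush it
--   on each blank line (and once at the end), emitting one rendered part per
--   chunk and joining the parts with the blank separator at the end."""
--   blocks = {}
--   parts = []
--   current = []
--   count = 0
--
--   def flush():
--     nonlocal current, count
--     if not current:
--       return
--     if all(line.strip().startswith('--') for line in current):
--       placeholder = f'-- __COMMENT_BLOCK_{count}__'
--       blocks[placeholder] = '\n'.join(current) + '\n'
--       parts.append(placeholder)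
--     else:
--       parts.append('\n'.join(current))
--     count += 1
--     current = []
--
--   for line in sql.splitlines():
--     if line.strip():
--       current.append(line)
--     else:
--       flush()
--   flush()
--
--   return '\n\n\n'.join(parts).strip(), blocks
-- ===== Notes on version B (the rewrite author's own statement) =====
-- stated objective: alternative
-- what changed: B fuses A's two phases into one streaming pass over the lines: it keeps only the pending chunk plus a chunk counter, flushes (classifies and renders) each chunk the moment its terminating blank line is seen, never builds A's intermediate chunks list or its placeholder-padded result-lines list, and finally joins one rendered string per chunk with a triple-newline separator instead of joining A's padded line list with single newlines.
import Mathlib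
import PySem

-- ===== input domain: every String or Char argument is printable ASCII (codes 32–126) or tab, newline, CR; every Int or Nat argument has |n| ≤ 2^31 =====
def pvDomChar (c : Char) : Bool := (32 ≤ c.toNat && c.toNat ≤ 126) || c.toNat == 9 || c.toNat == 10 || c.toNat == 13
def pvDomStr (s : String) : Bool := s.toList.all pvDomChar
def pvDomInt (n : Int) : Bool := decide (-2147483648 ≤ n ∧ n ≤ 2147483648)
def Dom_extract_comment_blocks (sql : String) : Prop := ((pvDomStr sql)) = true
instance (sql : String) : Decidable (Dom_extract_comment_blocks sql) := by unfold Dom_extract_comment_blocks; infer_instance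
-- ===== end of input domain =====

-- B replaces A's two-phase chunking (chunk list, then a padded result-line list joined by '\n')
-- with one streaming pass that flushes each chunk on its terminating blank line and joins the
-- rendered parts with '\n\n\n'; objective: alternative decomposition, same O(n) cost.

-- ===== PORT A =====
-- first loop of A: split the lines into chunks separated by blank lines
def pvAStep1 (st : List (List String) × List String) (line : String) :
    List (List String) × List String :=
  if PySem.Str.strip line ≠ "" then (st.1, st.2 ++ [line])
  else if st.2 ≠ [] then (st.1 ++ [st.2], [])
  else st

-- second loop of A: process one enumerated chunk into (blocks dict, result lines)
def pvAStep2 (st : PySem.Dict String String × List String) (ic : Int × List String) :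
    PySem.Dict String String × List String :=
  if ic.2.all (fun line => PySem.Str.startswith (PySem.Str.strip line) "--") then
    let placeholder := "-- __COMMENT_BLOCK_" ++ PySem.Int.toStr ic.1 ++ "__"
    (st.1.insert placeholder (PySem.Str.join "\n" ic.2 ++ "\n"),
     st.2 ++ ["", placeholder, ""])
  else
    (st.1, st.2 ++ [""] ++ ic.2 ++ [""])

def extract_comment_blocks (sql : String) : String × (List (String × String)) :=
  let p := (PySem.Str.splitlines sql).foldl pvAStep1 ([], [])
  let chunks := if p.2 ≠ [] then p.1 ++ [p.2] else p.1
  let q := (PySem.List.enumerate chunks).foldl pvAStep2 (⟨[]⟩, [])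
  (PySem.Str.strip (PySem.Str.join "\n" q.2), q.1.items)

-- ===== PORT B =====
-- B's state: (current chunk, chunk counter, rendered parts, blocks dict)
-- the flush() helper of Source B
def pvFlush (st : List String × Int × List String × PySem.Dict String String) :
    List String × Int × List String × PySem.Dict String String :=
  if st.1 = [] then st
  else if st.1.all (fun line => PySem.Str.startswith (PySem.Str.strip line) "--") then
    let placeholder := "-- __COMMENT_BLOCK_" ++ PySem.Int.toStr st.2.1 ++ "__"
    ([], st.2.1 + 1, st.2.2.1 ++ [placeholder],
     st.2.2.2.insert placeholder (PySem.Str.join "\n" st.1 ++ "\n"))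
  else ([], st.2.1 + 1, st.2.2.1 ++ [PySem.Str.join "\n" st.1], st.2.2.2)

-- body of B's single streaming loop
def pvBStep (st : List String × Int × List String × PySem.Dict String String) (line : String) :
    List String × Int × List String × PySem.Dict String String :=
  if PySem.Str.strip line ≠ "" then (st.1 ++ [line], st.2) else pvFlush st

def extract_comment_blocks_alt (sql : String) : String × (List (String × String)) :=
  let st := (PySem.Str.splitlines sql).foldl pvBStep ([], (0 : Int), [], (⟨[]⟩ : PySem.Dict String String))
  let st := pvFlush st
  (PySem.Str.strip (PySem.Str.join "\n\n\n" st.2.2.1), st.2.2.2.items)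

-- ===== PRECONDITION & SPEC =====
def Spec_extract_comment_blocks (sql : String) (out : String × (List (String × String))) : Prop := out = extract_comment_blocks_alt sql
instance (sql : String) (out : String × (List (String × String))) : Decidable (Spec_extract_comment_blocks sql out) := by unfold Spec_extract_comment_blocks; infer_instance

-- ===== CLAIM (what is proved, stated in full; the proofs are below) =====
def Claim_equal_extract_comment_blocks : Prop := ∀ (sql : String), Dom_extract_comment_blocks sql → Spec_extract_comment_blocks sql (extract_comment_blocks sql)

-- ===== LEMMAS AND PROOFS =====

-- flush on B's state always empties the current chunk and acts only on the rest
def pvFlushS (s : Int × List String × PySem.Dict String String) (c : List String) :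
    Int × List String × PySem.Dict String String :=
  (pvFlush (c, s)).2

lemma pvFlush_eq (c : List String) (s : Int × List String × PySem.Dict String String) :
    pvFlush (c, s) = ([], pvFlushS s c) := by
  unfold pvFlushS pvFlush
  rcases s with ⟨n, parts, d⟩
  by_cases h : c = [] <;> simp [h] <;> split <;> simp

lemma pvFlushS_nil (s : Int × List String × PySem.Dict String String) :
    pvFlushS s [] = s := by
  simp [pvFlushS, pvFlush]

-- accumulator lemma for A's first loop
lemma pvAStep1_acc (lines : List String) (chs : List (List String)) (cur : List String) :
    lines.foldl pvAStep1 (chs, cur)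
      = (chs ++ (lines.foldl pvAStep1 ([], cur)).1, (lines.foldl pvAStep1 ([], cur)).2) := by
  induction lines generalizing chs cur with
  | nil => simp
  | cons l ls ih =>
    simp only [List.foldl_cons]
    by_cases h1 : PySem.Str.strip l ≠ ""
    · rw [show pvAStep1 (chs, cur) l = (chs, cur ++ [l]) by simp [pvAStep1, h1],
          show pvAStep1 ([], cur) l = ([], cur ++ [l]) by simp [pvAStep1, h1]]
      exact ih chs (cur ++ [l])
    · by_cases h2 : cur ≠ []
      · rw [show pvAStep1 (chs, cur) l = (chs ++ [cur], []) by simp [pvAStep1, h1, h2],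
            show pvAStep1 ([], cur) l = ([cur], []) by simp [pvAStep1, h1, h2]]
        rw [ih (chs ++ [cur]) [], ih [cur] []]
        simp
      · rw [show pvAStep1 (chs, cur) l = (chs, cur) by simp [pvAStep1, h1, h2],
            show pvAStep1 ([], cur) l = ([], cur) by simp [pvAStep1, h1, h2]]
        exact ih chs cur

-- every chunk produced by A's first loop is nonempty
lemma pvAStep1_chunks_ne (lines : List String) (cur : List String) :
    ∀ c ∈ (lines.foldl pvAStep1 ([], cur)).1, c ≠ [] := by
  induction lines generalizing cur with
  | nil => simp
  | cons l ls ih =>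
    intro c hc
    rw [List.foldl_cons] at hc
    by_cases h1 : PySem.Str.strip l ≠ ""
    · rw [show pvAStep1 ([], cur) l = ([], cur ++ [l]) by simp [pvAStep1, h1]] at hc
      exact ih _ c hc
    · by_cases h2 : cur ≠ []
      · rw [show pvAStep1 ([], cur) l = ([cur], []) by simp [pvAStep1, h1, h2],
            pvAStep1_acc ls [cur] []] at hc
        simp only [List.singleton_append, List.mem_cons] at hc
        rcases hc with hc | hc
        · exact hc ▸ h2
        · exact ih _ c hc
      · rw [show pvAStep1 ([], cur) l = ([], cur) by simp [pvAStep1, h1, h2]] at hc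
        exact ih _ c hc

-- loop fusion: B's single pass equals A's first pass followed by flushing each chunk
lemma pvFusion (lines : List String) (cur : List String)
    (s : Int × List String × PySem.Dict String String) :
    lines.foldl pvBStep (cur, s)
      = ((lines.foldl pvAStep1 ([], cur)).2,
         (lines.foldl pvAStep1 ([], cur)).1.foldl pvFlushS s) := by
  induction lines generalizing cur s with
  | nil => simp
  | cons l ls ih =>
    simp only [List.foldl_cons]
    by_cases h1 : PySem.Str.strip l ≠ ""
    · rw [show pvBStep (cur, s) l = (cur ++ [l], s) by simp [pvBStep, h1],
          show pvAStep1 ([], cur) l = ([], cur ++ [l]) by simp [pvAStep1, h1]]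
      exact ih _ _
    · by_cases h2 : cur ≠ []
      · rw [show pvBStep (cur, s) l = ([], pvFlushS s cur) by
              rw [show pvBStep (cur, s) l = pvFlush (cur, s) by simp [pvBStep, h1]]
              exact pvFlush_eq cur s,
            show pvAStep1 ([], cur) l = ([cur], []) by simp [pvAStep1, h1, h2]]
        rw [ih [] (pvFlushS s cur), pvAStep1_acc ls [cur] []]
        simp
      · have h2' : cur = [] := not_not.mp h2
        subst h2'
        rw [show pvBStep ([], s) l = ([], s) by simp [pvBStep, h1, pvFlush],
            show pvAStep1 ([], ([] : List String)) l = ([], ([] : List String)) by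
              simp [pvAStep1, h1]]
        exact ih _ _

-- rendered content of a chunk with index n
def pvRend (n : Int) (c : List String) : List String :=
  if c.all (fun line => PySem.Str.startswith (PySem.Str.strip line) "--") then
    ["-- __COMMENT_BLOCK_" ++ PySem.Int.toStr n ++ "__"]
  else c

-- A's result lines for a chunk list starting at index n
def pvLns : List (List String) → Int → List String
  | [], _ => []
  | c :: cs, n => ([""] ++ pvRend n c ++ [""]) ++ pvLns cs (n + 1)

-- B's parts for a chunk list starting at index n
def pvPrt : List (List String) → Int → List String
  | [], _ => []
  | c :: cs, n => PySem.Str.join "\n" (pvRend n c) :: pvPrt cs (n + 1)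

-- the blocks dict both sides build
def pvDF : List (List String) → Int → PySem.Dict String String → PySem.Dict String String
  | [], _, d => d
  | c :: cs, n, d =>
      pvDF cs (n + 1)
        (if c.all (fun line => PySem.Str.startswith (PySem.Str.strip line) "--") then
          d.insert ("-- __COMMENT_BLOCK_" ++ PySem.Int.toStr n ++ "__")
            (PySem.Str.join "\n" c ++ "\n")
        else d)

lemma pvA2_spec (cs : List (List String)) (n : Int) (d : PySem.Dict String String)
    (res : List String) :
    (PySem.List.enumerate cs n).foldl pvAStep2 (d, res) = (pvDF cs n d, res ++ pvLns cs n) := by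
  induction cs generalizing n d res with
  | nil => simp [pvLns, pvDF, PySem.List.enumerate_nil]
  | cons c cs ih =>
    rw [PySem.List.enumerate_cons, List.foldl_cons]
    by_cases h : c.all (fun line => PySem.Str.startswith (PySem.Str.strip line) "--")
    · simp only [pvAStep2, h, ite_true, ih, pvDF, pvLns, pvRend]
      simp [h]
    · simp only [pvAStep2, h, ite_false, ih, pvDF, pvLns, pvRend]
      simp [h]

lemma pvJoin_single (sep p : String) : PySem.Str.join sep [p] = p := by
  simp [PySem.Str.join, PySem.Chars.join_singleton]

lemma pvFlushS_ne (n : Int) (parts : List String) (d : PySem.Dict String String)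
    (c : List String) (hc : c ≠ []) :
    pvFlushS (n, parts, d) c
      = (n + 1, parts ++ [PySem.Str.join "\n" (pvRend n c)],
         if c.all (fun line => PySem.Str.startswith (PySem.Str.strip line) "--") then
           d.insert ("-- __COMMENT_BLOCK_" ++ PySem.Int.toStr n ++ "__")
             (PySem.Str.join "\n" c ++ "\n")
         else d) := by
  unfold pvFlushS pvFlush
  dsimp only
  by_cases h : (c.all fun line => PySem.Str.startswith (PySem.Str.strip line) "--") = true
  · rw [if_neg hc, if_pos h, if_pos h,
        show pvRend n c = ["-- __COMMENT_BLOCK_" ++ PySem.Int.toStr n ++ "__"] from by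
          unfold pvRend; rw [if_pos h],
        pvJoin_single]
  · rw [if_neg hc, if_neg h, if_neg h,
        show pvRend n c = c from by unfold pvRend; rw [if_neg h]]

lemma pvB2_spec (cs : List (List String)) (hne : ∀ c ∈ cs, c ≠ []) (n : Int)
    (parts : List String) (d : PySem.Dict String String) :
    cs.foldl pvFlushS (n, parts, d) = (n + cs.length, parts ++ pvPrt cs n, pvDF cs n d) := by
  induction cs generalizing n parts d with
  | nil => simp [pvPrt, pvDF]
  | cons c cs ih =>
    have hc : c ≠ [] := hne c (by simp)
    rw [List.foldl_cons, pvFlushS_ne n parts d c hc,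
        ih (fun x hx => hne x (List.mem_cons_of_mem _ hx)),
        show pvPrt (c :: cs) n = PySem.Str.join "\n" (pvRend n c) :: pvPrt cs (n + 1) from rfl,
        show pvDF (c :: cs) n d = pvDF cs (n + 1)
            (if c.all (fun line => PySem.Str.startswith (PySem.Str.strip line) "--") then
              d.insert ("-- __COMMENT_BLOCK_" ++ PySem.Int.toStr n ++ "__")
                (PySem.Str.join "\n" c ++ "\n")
            else d) from rfl]
    simp only [Prod.mk.injEq, List.append_assoc, List.singleton_append, List.length_cons]
    refine ⟨by push_cast; ring, trivial⟩

-- join over the append of two nonempty lists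
lemma pvJoin_append (sep : List Char) (xs ys : List (List Char)) (hx : xs ≠ []) (hy : ys ≠ []) :
    PySem.Chars.join sep (xs ++ ys) = PySem.Chars.join sep xs ++ sep ++ PySem.Chars.join sep ys := by
  induction xs with
  | nil => exact absurd rfl hx
  | cons a as ih =>
    cases as with
    | nil =>
      cases ys with
      | nil => exact absurd rfl hy
      | cons b bs => simp [PySem.Chars.join_cons_cons, PySem.Chars.join_singleton]
    | cons a' as' =>
      have := ih (by simp)
      simp only [List.cons_append, PySem.Chars.join_cons_cons] at *
      rw [this]
      simp

lemma pvRend_ne (n : Int) (c : List String) (hc : c ≠ []) : pvRend n c ≠ [] := by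
  unfold pvRend; split <;> simp [hc]

lemma pvLns_ne (c : List String) (cs : List (List String)) (n : Int) :
    pvLns (c :: cs) n ≠ [] := by
  simp [pvLns]

-- one padded chunk: join "\n" ('' :: rendered ++ ['']) wraps the rendered join in one '\n' each side
lemma pvJoin_pad (n : Int) (c : List String) (hc : c ≠ []) :
    (PySem.Str.join "\n" ([""] ++ pvRend n c ++ [""])).toList
      = '\n' :: (PySem.Str.join "\n" (pvRend n c)).toList ++ ['\n'] := by
  have hR : (pvRend n c).map String.toList ≠ [] := by simp [pvRend_ne n c hc]
  simp only [PySem.Str.toList_join, List.map_append, List.map_cons, List.map_nil]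
  rw [pvJoin_append _ _ _ (by simp) (by simp),
      pvJoin_append _ _ _ (by simp) hR]
  simp [PySem.Chars.join_singleton]

-- the '\n'-join of A's padded lines is the '\n\n\n'-join of B's parts wrapped in one '\n' each side
lemma pvJoin_lns (cs : List (List String)) (n : Int) (hcs : cs ≠ []) (hne : ∀ c ∈ cs, c ≠ []) :
    (PySem.Str.join "\n" (pvLns cs n)).toList
      = '\n' :: (PySem.Str.join "\n\n\n" (pvPrt cs n)).toList ++ ['\n'] := by
  induction cs generalizing n with
  | nil => exact absurd rfl hcs
  | cons c cs ih =>
    have hc : c ≠ [] := hne c (by simp)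
    cases cs with
    | nil =>
      rw [show pvLns [c] n = [""] ++ pvRend n c ++ [""] from by simp [pvLns],
          show pvPrt [c] n = [PySem.Str.join "\n" (pvRend n c)] from rfl,
          pvJoin_pad n c hc, pvJoin_single]
    | cons c' cs' =>
      have hrest : pvLns (c' :: cs') (n + 1) ≠ [] := pvLns_ne _ _ _
      rw [show pvLns (c :: c' :: cs') n
            = ([""] ++ pvRend n c ++ [""]) ++ pvLns (c' :: cs') (n + 1) from rfl]
      have h1 : (PySem.Str.join "\n" ((([""] ++ pvRend n c ++ [""]) : List String)
            ++ pvLns (c' :: cs') (n + 1))).toList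
          = (PySem.Str.join "\n" (([""] ++ pvRend n c ++ [""] : List String))).toList
            ++ ['\n'] ++ (PySem.Str.join "\n" (pvLns (c' :: cs') (n + 1))).toList := by
        simp only [PySem.Str.toList_join, List.map_append]
        rw [pvJoin_append _ _ _ (by simp) (by simp [hrest])]
        simp
      rw [h1, pvJoin_pad n c hc, ih (n + 1) (by simp) (fun x hx => hne x (by simp [hx]))]
      have h3 : (PySem.Str.join "\n\n\n" (pvPrt (c :: c' :: cs') n)).toList
          = (PySem.Str.join "\n" (pvRend n c)).toList ++ ['\n', '\n', '\n']
            ++ (PySem.Str.join "\n\n\n" (pvPrt (c' :: cs') (n + 1))).toList := by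
        rw [show pvPrt (c :: c' :: cs') n
              = [PySem.Str.join "\n" (pvRend n c)] ++ pvPrt (c' :: cs') (n + 1) from rfl]
        simp only [PySem.Str.toList_join, List.map_append]
        rw [pvJoin_append _ _ _ (by simp) (by simp [pvPrt])]
        simp [PySem.Chars.join_singleton]
      rw [h3]
      simp

-- stripping ignores one whitespace char added at either end
lemma pvStrip_cons (c : Char) (h : PySem.Chars.isspace c = true) (l : List Char) :
    PySem.Chars.strip (c :: l) = PySem.Chars.strip l := by
  simp [PySem.Chars.strip, PySem.Chars.lstrip, h]

lemma pvRstrip_append (c : Char) (h : PySem.Chars.isspace c = true) (l : List Char) :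
    PySem.Chars.rstrip (l ++ [c]) = PySem.Chars.rstrip l := by
  simp [PySem.Chars.rstrip, h]

lemma pvStrip_append (c : Char) (h : PySem.Chars.isspace c = true) (l : List Char) :
    PySem.Chars.strip (l ++ [c]) = PySem.Chars.strip l := by
  simp only [PySem.Chars.strip, PySem.Chars.lstrip, List.dropWhile_append]
  split
  · next hemp =>
    rw [List.isEmpty_iff] at hemp
    rw [hemp]
    simp [h, PySem.Chars.rstrip]
  · rw [pvRstrip_append c h]

lemma pvStrip_wrap (l : List Char) :
    PySem.Chars.strip ('\n' :: l ++ ['\n']) = PySem.Chars.strip l := by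
  rw [show ('\n' :: l ++ ['\n']) = '\n' :: (l ++ ['\n']) from rfl,
      pvStrip_cons '\n' (by decide), pvStrip_append '\n' (by decide)]

-- ===== VERDICT (by name: the statement is the Claim_ definition above) =====
theorem extract_comment_blocks_spec : Claim_equal_extract_comment_blocks := by
  intro sql _
  unfold Spec_extract_comment_blocks
  simp only [extract_comment_blocks, extract_comment_blocks_alt]
  generalize PySem.Str.splitlines sql = lines
  have hne : ∀ c ∈ (if (List.foldl pvAStep1 ([], []) lines).2 ≠ []
        then (List.foldl pvAStep1 ([], []) lines).1 ++ [(List.foldl pvAStep1 ([], []) lines).2]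
        else (List.foldl pvAStep1 ([], []) lines).1), c ≠ [] := by
    intro c hc
    by_cases h2 : (List.foldl pvAStep1 ([], []) lines).2 ≠ []
    · rw [if_pos h2] at hc
      rcases List.mem_append.mp hc with hc | hc
      · exact pvAStep1_chunks_ne lines [] c hc
      · rw [List.mem_singleton] at hc
        exact hc ▸ h2
    · rw [if_neg h2] at hc
      exact pvAStep1_chunks_ne lines [] c hc
  have hB : pvFlush (List.foldl pvBStep ([], (0 : Int), [], (⟨[]⟩ : PySem.Dict String String)) lines)
      = ([], List.foldl pvFlushS ((0 : Int), [], (⟨[]⟩ : PySem.Dict String String))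
          (if (List.foldl pvAStep1 ([], []) lines).2 ≠ []
            then (List.foldl pvAStep1 ([], []) lines).1 ++ [(List.foldl pvAStep1 ([], []) lines).2]
            else (List.foldl pvAStep1 ([], []) lines).1)) := by
    rw [pvFusion lines [] _, pvFlush_eq]
    by_cases h2 : (List.foldl pvAStep1 ([], []) lines).2 ≠ []
    · rw [if_pos h2]
      simp [List.foldl_append]
    · rw [if_neg h2]
      rw [not_not] at h2
      rw [h2, pvFlushS_nil]
  rw [hB]
  generalize hch : (if (List.foldl pvAStep1 ([], []) lines).2 ≠ []
      then (List.foldl pvAStep1 ([], []) lines).1 ++ [(List.foldl pvAStep1 ([], []) lines).2]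
      else (List.foldl pvAStep1 ([], []) lines).1) = chunks at hne ⊢
  rw [pvA2_spec chunks 0 _ [], pvB2_spec chunks hne 0 [] _]
  dsimp only
  simp only [Prod.mk.injEq, List.nil_append]
  refine ⟨?_, trivial⟩
  cases chunks with
  | nil => simp [pvLns, pvPrt, PySem.Str.join, PySem.Chars.join_nil]
  | cons c cs =>
    have h := pvJoin_lns (c :: cs) 0 (by simp) hne
    simp only [PySem.Str.strip]
    rw [h, pvStrip_wrap]
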